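-- pv_equiv track=rewrite | github.com/lineality/gutenberg_babble | perseids/byte_perseid/dynamic_slide_backweighted_validation_perseidbyte_v2.py | _window_has_complete_answer
-- ===== SOURCE A (Python) =====
-- def _window_has_complete_answer(
--
--     window: list[int],
--     delimiter_tokens: list[int] | None,
-- ) -> bool:
--     """
--     Check if window contains exactly 2 delimiter sequences (complete answer).
--
--     Logic:
--         - 0 delimiters: No answer in this window
--         - 1 delimiter: Partial answer (split across windows)
--         - 2 delimiters: Complete answer (|||answer||| fully present)
--         - >2 delimiters: Multiple answers or malformed (treat as no answer)
--
--     Args: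
--         window: Token sequence to check
--         delimiter_tokens: Token IDs representing "|||" delimiter
--
--     Returns:
--         True if exactly 2 delimiters found (complete answer present)
--         False otherwise
--
--     Example:
--         delimiter_tokens = [124, 124, 124]  # "|||" encoded as bytes
--
--         window = [..., 124, 124, 124, 50, 124, 124, 124, ...]
--                       ^^^^^^^^^^^^ delimiter 1  ^^^^^^^^^^^^ delimiter 2
--
--         Returns: True (complete answer between delimiters)
--     """
--     if delimiter_tokens is None or len(delimiter_tokens) == 0:
--         # No delimiter specified - cannot detect answers
--         return False
--
--     delimiter_length = len(delimiter_tokens)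
--     delimiter_count = 0
--
--     # Scan window for delimiter occurrences
--     for window_idx in range(len(window) - delimiter_length + 1):
--         # Check if delimiter sequence matches at this position
--         if window[window_idx : window_idx + delimiter_length] == delimiter_tokens:
--             delimiter_count += 1
--
--             # Early exit if we find more than 2 (malformed)
--             if delimiter_count > 2:
--                 return False
--
--     # Exactly 2 delimiters = complete answer present
--     return delimiter_count == 2
-- ===== SOURCE B (Python) =====
-- def _window_has_complete_answer(window, delimiter_tokens):
--     # Bit-parallel Shift-And matcher: precompute a bitmask per token value,
--     # then one pass over the window updating an automaton state integer;
--     # no slicing, overlapping matches counted, early exit past 2.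
--     if not delimiter_tokens:
--         return False
--     m = len(delimiter_tokens)
--     char_mask = {}
--     for j, tok in enumerate(delimiter_tokens):
--         char_mask[tok] = char_mask.get(tok, 0) | (1 << j)
--     accept = 1 << (m - 1)
--     state = 0
--     count = 0
--     for tok in window:
--         state = ((state << 1) | 1) & char_mask.get(tok, 0)
--         if state & accept:
--             count += 1
--             if count > 2:
--                 return False
--     return count == 2
-- ===== Notes on version B (the rewrite author's own statement) =====
-- stated objective: alternative
-- what changed: A scans every window position and compares a fresh slice against the delimiter; B is a bit-parallel Shift-And matcher: it precomputes one bitmask per token value and makes a single pass over the window updating an automaton state integer, counting accepting states, with the same early exit past 2.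
import Mathlib
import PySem

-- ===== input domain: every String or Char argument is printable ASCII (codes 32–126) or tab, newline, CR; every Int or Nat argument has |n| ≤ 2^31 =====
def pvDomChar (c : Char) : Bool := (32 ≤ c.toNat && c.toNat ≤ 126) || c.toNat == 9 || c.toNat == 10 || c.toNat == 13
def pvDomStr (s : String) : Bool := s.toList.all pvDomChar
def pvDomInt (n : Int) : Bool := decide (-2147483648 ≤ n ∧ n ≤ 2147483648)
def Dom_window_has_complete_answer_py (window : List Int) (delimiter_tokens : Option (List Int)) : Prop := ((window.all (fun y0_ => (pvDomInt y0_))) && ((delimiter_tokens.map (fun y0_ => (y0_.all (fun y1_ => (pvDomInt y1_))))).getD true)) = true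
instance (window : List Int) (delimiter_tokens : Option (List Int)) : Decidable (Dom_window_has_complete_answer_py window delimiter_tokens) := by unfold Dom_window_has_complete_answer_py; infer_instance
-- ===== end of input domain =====

-- B replaces A's slice-per-position scan by a bit-parallel Shift-And automaton: per-token bitmasks precomputed once, one pass over the window (alternative algorithm, no slicing).


-- ===== PORT A =====
-- the 'for window_idx in range(...)' loop with the running delimiter_count and the early 'return False'
def pvALoop (window d : List Int) (m : Int) : List Int → Int → Bool
  | [], cnt => cnt == 2
  | i :: rest, cnt =>
      if PySem.List.slice window (some i) (some (i + m)) == d then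
        if cnt + 1 > 2 then false else pvALoop window d m rest (cnt + 1)
      else pvALoop window d m rest cnt

def window_has_complete_answer_py (window : List Int) (delimiter_tokens : Option (List Int)) : Bool :=
  match delimiter_tokens with
  | none => false
  | some d =>
      if (d.length : Int) == 0 then false
      else
        pvALoop window d (d.length : Int)
          (PySem.List.pyRange 0 ((window.length : Int) - (d.length : Int) + 1) 1) 0

-- ===== PORT B =====
-- 'for j, tok in enumerate(delimiter_tokens): char_mask[tok] = char_mask.get(tok, 0) | (1 << j)'
-- (mask values are nonnegative Python ints, represented as Nat — '|' and '<<' agree there;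
--  the enumerate index j is ≥ 0, so '.toNat' is exact)
def pvBMasks (d : List Int) : PySem.Dict Int Nat :=
  (PySem.List.enumerate d).foldl
    (fun cm p => cm.insert p.2 ((cm.getD p.2 0) ||| (1 <<< p.1.toNat))) PySem.Dict.empty

-- the 'for tok in window' loop with state, count and the early 'return False'
-- ('if state & accept:' is Python int truthiness, i.e. ≠ 0)
def pvBLoop (cm : PySem.Dict Int Nat) (accept : Nat) : List Int → Nat → Int → Bool
  | [], _, count => count == 2
  | tok :: rest, state, count =>
      let s := ((state <<< 1) ||| 1) &&& (cm.getD tok 0)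
      if (s &&& accept) != 0 then
        if count + 1 > 2 then false else pvBLoop cm accept rest s (count + 1)
      else pvBLoop cm accept rest s count

def window_has_complete_answer_py_alt (window : List Int) (delimiter_tokens : Option (List Int)) : Bool :=
  match delimiter_tokens with
  | none => false
  | some d =>
      if (d.length : Int) == 0 then false
      else pvBLoop (pvBMasks d) (1 <<< (d.length - 1)) window 0 0

-- ===== PRECONDITION & SPEC =====
def Spec_window_has_complete_answer_py (window : List Int) (delimiter_tokens : Option (List Int)) (out : Bool) : Prop := out = window_has_complete_answer_py_alt window delimiter_tokens
instance (window : List Int) (delimiter_tokens : Option (List Int)) (out : Bool) : Decidable (Spec_window_has_complete_answer_py window delimiter_tokens out) := by unfold Spec_window_has_complete_answer_py; infer_instance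

-- ===== CLAIM (what is proved, stated in full; the proofs are below) =====
def Claim_equal_window_has_complete_answer_py : Prop := ∀ (window : List Int) (delimiter_tokens : Option (List Int)), Dom_window_has_complete_answer_py window delimiter_tokens → Spec_window_has_complete_answer_py window delimiter_tokens (window_has_complete_answer_py window delimiter_tokens)

-- ===== LEMMAS AND PROOFS =====

-- the per-position match predicate of A's loop
def pvP (window d : List Int) (m : Int) (i : Int) : Bool :=
  PySem.List.slice window (some i) (some (i + m)) == d

-- 'j-th automaton bit is live after reading p': the (j+1)-prefix of d is a suffix of p
def pvGood (d p : List Int) (j : Nat) : Bool := decide (j < d.length ∧ d.take (j+1) <:+ p)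

-- number of positions of r at which an occurrence of d (inside p ++ r) ends
def pvEnds (d p r : List Int) : Nat :=
  (List.range r.length).countP (fun k => decide (d <:+ p ++ r.take (k+1)))

-- A's thresholded counting loop computes 'total count = 2'
theorem pvALoop_eq_count (window d : List Int) (m : Int) :
    ∀ (L : List Int) (cnt : Int), 0 ≤ cnt → cnt ≤ 2 →
      pvALoop window d m L cnt = decide (cnt + ((L.filter (pvP window d m)).length : Int) = 2) := by
  intro L
  induction L with
  | nil =>
      intro cnt h0 h2
      by_cases h : cnt = 2 <;> simp [pvALoop, h]
  | cons i rest ih =>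
      intro cnt h0 h2
      by_cases hp : PySem.List.slice window (some i) (some (i + m)) = d
      · by_cases hgt : cnt + 1 > 2
        · have hc : cnt = 2 := by omega
          subst hc
          simp [pvALoop, pvP, hp]
          omega
        · rw [show pvALoop window d m (i :: rest) cnt
              = pvALoop window d m rest (cnt + 1) by simp [pvALoop, hp, hgt]]
          rw [ih (cnt + 1) (by omega) (by omega)]
          simp [pvP, hp]
          omega
      · rw [show pvALoop window d m (i :: rest) cnt
            = pvALoop window d m rest cnt by simp [pvALoop, hp]]
        rw [ih cnt h0 h2]
        simp [pvP, hp]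

-- the char_mask dict: bit j of char_mask.get(t, 0) is set iff d[j] = t
theorem pvBMasks_fold (d : List Int) :
    ∀ (s : Nat) (cm : PySem.Dict Int Nat) (t : Int) (j : Nat),
      (((PySem.List.enumerate d (s : Int)).foldl
          (fun cm p => cm.insert p.2 ((cm.getD p.2 0) ||| (1 <<< p.1.toNat))) cm).getD t 0).testBit j
      = ((cm.getD t 0).testBit j || (decide (s ≤ j) && (d[j - s]? == some t))) := by
  induction d with
  | nil => intro s cm t j; simp [PySem.List.enumerate_nil]
  | cons x d ih =>
      intro s cm t j
      rw [PySem.List.enumerate_cons]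
      rw [List.foldl_cons]
      have hcast : (s : Int) + 1 = ((s + 1 : Nat) : Int) := by push_cast; ring
      rw [hcast, ih (s + 1)]
      rw [PySem.Dict.getD_insert]
      by_cases ht : t = x
      · subst ht
        rw [if_pos rfl]
        simp only [Nat.testBit_or, Nat.one_shiftLeft, Nat.testBit_two_pow, Int.toNat_natCast]
        rcases Nat.lt_trichotomy j s with h | h | h
        · have h1 : ¬ (s ≤ j) := by omega
          have h2 : ¬ (s + 1 ≤ j) := by omega
          have h3 : ¬ (s = j) := by omega
          simp [h1, h2, h3]
        · subst h
          have : (t :: d)[j - j]? = some t := by simp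
          simp
        · have h1 : s ≤ j := by omega
          have h2 : s + 1 ≤ j := by omega
          have h3 : ¬ (s = j) := by omega
          have h4 : (t :: d)[j - s]? = d[j - s - 1]? := by
            have : j - s = (j - s - 1) + 1 := by omega
            rw [this]; simp
          have h5 : j - (s+1) = j - s - 1 := by omega
          simp [h1, h2, h3, h4, h5]
      · rw [if_neg ht]
        rcases Nat.lt_trichotomy j s with h | h | h
        · have h1 : ¬ (s ≤ j) := by omega
          have h2 : ¬ (s + 1 ≤ j) := by omega
          simp [h1, h2]
        · subst h
          simp
          exact fun h => absurd h.symm ht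
        · have h1 : s ≤ j := by omega
          have h2 : s + 1 ≤ j := by omega
          have h4 : (x :: d)[j - s]? = d[j - s - 1]? := by
            have : j - s = (j - s - 1) + 1 := by omega
            rw [this]; simp
          have h5 : j - (s+1) = j - s - 1 := by omega
          simp [h1, h2, h4, h5]

theorem pvBMasks_spec (d : List Int) (t : Int) (j : Nat) :
    ((pvBMasks d).getD t 0).testBit j = (d[j]? == some t) := by
  have h := pvBMasks_fold d 0 PySem.Dict.empty t j
  simpa [pvBMasks] using h

-- suffix of an appended singleton
theorem pvSuffix_concat (l p : List Int) (x t : Int) :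
    (l ++ [x] <:+ p ++ [t]) ↔ (x = t ∧ l <:+ p) := by
  simp only [← List.reverse_prefix, List.reverse_append, List.reverse_singleton,
    List.singleton_append, List.cons_prefix_cons]

-- one automaton step preserves the bit invariant
theorem pvStep_spec (d p : List Int) (t : Int) (s : Nat)
    (hs : ∀ j, s.testBit j = pvGood d p j) (j : Nat) :
    (((s <<< 1) ||| 1) &&& ((pvBMasks d).getD t 0)).testBit j = pvGood d (p ++ [t]) j := by
  rw [Nat.testBit_and, Nat.testBit_or, Nat.testBit_shiftLeft, pvBMasks_spec]
  have h1 : (1 : Nat).testBit j = decide (0 = j) := by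
    rw [show (1:Nat) = 2^0 by norm_num, Nat.testBit_two_pow]
  rw [h1]
  by_cases hj : j < d.length
  · have hjq : d[j]? = some d[j] := List.getElem?_eq_getElem hj
    rw [hjq]
    have htake : d.take (j+1) = d.take j ++ [d[j]] := by
      rw [List.take_add_one, hjq]; rfl
    cases Nat.eq_zero_or_pos j with
    | inl h0 =>
        subst h0
        have hiff := pvSuffix_concat [] p d[0] t
        simp only [List.nil_append, List.nil_suffix, and_true] at hiff
        simp [pvGood, hj, htake, hiff]
        by_cases h : d[0] = t <;> simp [h]
    | inr hpos =>
        have hd1 : (1:Nat) ≤ j := hpos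
        have hne : ¬ ((0:Nat) = j) := by omega
        have hj1 : j - 1 + 1 = j := by omega
        have hj2 : j - 1 < d.length := by omega
        rw [hs (j-1)]
        by_cases hdt : d[j] = t <;> by_cases hsuf : List.take j d <:+ p <;>
          simp only [pvGood, hj, hj1, hj2, htake, pvSuffix_concat, hd1, hne, hdt, hsuf,
            decide_true, decide_false, true_and, and_true, false_and, and_false,
            Bool.true_and, Bool.and_true, Bool.false_and, Bool.and_false,
            Bool.or_false, Bool.false_or, beq_iff_eq, decide_eq_true_eq] <;> simp [hdt, hsuf, hne, hd1]
  · have hjq : d[j]? = none := by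
      rw [List.getElem?_eq_none_iff]; omega
    simp [hjq, pvGood, hj]

theorem pvHit (a k : Nat) : ((a &&& (1 <<< k)) != 0) = a.testBit k := by
  rw [Nat.one_shiftLeft, Nat.and_two_pow]
  cases h : a.testBit k <;> simp [h]

-- pvEnds unfolding at a cons
theorem pvEnds_cons (d p : List Int) (t : Int) (r : List Int) :
    pvEnds d p (t :: r) = (if d <:+ p ++ [t] then 1 else 0) + pvEnds d (p ++ [t]) r := by
  unfold pvEnds
  rw [List.length_cons, List.range_succ_eq_map, List.countP_cons, List.countP_map]
  have hf : ((fun k => decide (d <:+ p ++ (t :: r).take (k + 1))) ∘ Nat.succ)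
      = (fun k => decide (d <:+ (p ++ [t]) ++ r.take (k + 1))) :=
    funext fun k => by simp [List.append_assoc]
  rw [hf]
  by_cases h : d <:+ p ++ [t] <;> simp [h] <;> omega

-- B's thresholded loop computes 'count so far + occurrences ending in the rest = 2'
theorem pvBLoop_eq (d : List Int) (hd : d ≠ []) :
    ∀ (r p : List Int) (s : Nat) (c : Int),
      (∀ j, s.testBit j = pvGood d p j) → 0 ≤ c → c ≤ 2 →
      pvBLoop (pvBMasks d) (1 <<< (d.length - 1)) r s c
        = decide (c + (pvEnds d p r : Int) = 2) := by
  intro r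
  induction r with
  | nil =>
      intro p s c _ h0 h2
      by_cases hc : c = 2 <;> simp [pvBLoop, pvEnds, hc]
  | cons t r ih =>
      intro p s c hs h0 h2
      have hstep := pvStep_spec d p t s hs
      have hhit : ((((s <<< 1) ||| 1) &&& ((pvBMasks d).getD t 0)) &&& (1 <<< (d.length - 1)) != 0)
          = decide (d <:+ p ++ [t]) := by
        rw [pvHit, hstep (d.length - 1)]
        unfold pvGood
        have h1 : d.length - 1 < d.length := by
          cases d with | nil => exact absurd rfl hd | cons a l => simp
        have h2t : d.length - 1 + 1 = d.length := by
          cases d with | nil => exact absurd rfl hd | cons a l => simp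
        rw [h2t, List.take_length]
        simp [h1]
      rw [pvEnds_cons]
      show (if _ then _ else _) = _
      rw [hhit]
      by_cases hocc : d <:+ p ++ [t]
      · rw [if_pos (by simp [hocc])]
        by_cases hc : c + 1 > 2
        · rw [if_pos hc]
          have : c = 2 := by omega
          subst this
          have : (0:Int) ≤ (pvEnds d (p ++ [t]) r : Int) := by positivity
          simp [hocc]
          omega
        · rw [if_neg hc, ih (p ++ [t]) _ (c+1) hstep (by omega) (by omega)]
          simp [hocc]
          constructor <;> (intro h; omega)
      · rw [if_neg (by simp [hocc]), ih (p ++ [t]) _ c hstep h0 h2]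
        simp [hocc]

-- count shift: occurrences indexed by start position vs by end position
theorem pvCountShift (P : Nat → Bool) (m : Nat) (hm : 1 ≤ m) :
    ∀ n, (List.range n).countP (fun k => decide (m ≤ k + 1) && P (k + 1 - m))
         = (List.range (n + 1 - m)).countP P := by
  intro n
  induction n with
  | zero =>
      have : 0 + 1 - m = 0 := by omega
      simp [this]
  | succ n ih =>
      rw [List.range_succ, List.countP_append, ih]
      by_cases h : m ≤ n + 1
      · have h2 : n + 1 + 1 - m = (n + 1 - m) + 1 := by omega
        rw [h2, List.range_succ, List.countP_append]
        simp [h]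
      · have h2 : n + 1 + 1 - m = n + 1 - m := by omega
        rw [h2]
        simp [h]

-- A's slice-match count equals the end-position count B tracks
theorem pvAcount_eq_ends (window d : List Int) (hd : d ≠ []) :
    (((PySem.List.pyRange 0 ((window.length : Int) - (d.length : Int) + 1) 1).filter
        (pvP window d (d.length : Int))).length : Int) = (pvEnds d [] window : Int) := by
  have hm : 1 ≤ d.length := List.length_pos_iff.mpr hd
  -- A's count as a Nat countP over List.range
  rw [← List.countP_eq_length_filter]
  rw [PySem.List.pyRange_one]
  rw [List.countP_map]
  have hK : (((window.length : Int) - (d.length : Int) + 1) - 0).toNat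
      = window.length + 1 - d.length := by omega
  rw [hK]
  have hcomp : ((pvP window d (d.length : Int)) ∘ (fun k : Nat => (0 : Int) + (k : Int)))
      = (fun i : Nat => decide ((window.drop i).take d.length = d)) := by
    funext i
    simp only [Function.comp, zero_add, pvP]
    rw [PySem.List.slice_natCast_add]
    by_cases h : (window.drop i).take d.length = d <;> simp [h]
  rw [hcomp]
  rw [← pvCountShift (fun i : Nat => decide ((window.drop i).take d.length = d)) d.length hm
        window.length]
  unfold pvEnds
  rw [List.countP_eq_length_filter, List.countP_eq_length_filter]
  rw [List.filter_congr ?_]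
  intro k hk
  rw [List.mem_range] at hk
  simp only [List.nil_append]
  set L := window.take (k+1) with hLdef
  have hL : L.length = k + 1 := by
    rw [hLdef, List.length_take]
    omega
  by_cases hmk : d.length ≤ k + 1
  · have hced : d <:+ L ↔ d = L.drop (k + 1 - d.length) := by
      rw [List.suffix_iff_eq_drop, hL]
    have hdt : L.drop (k + 1 - d.length) = (window.drop (k + 1 - d.length)).take d.length := by
      rw [hLdef, List.drop_take]
      congr 1
      omega
    rw [hdt] at hced
    by_cases h : (window.drop (k + 1 - d.length)).take d.length = d
    · simp [hced, h, hmk]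
    · simp [hced, h, hmk]
      exact fun hh => absurd hh.symm h
  · have hnot : ¬ (d <:+ L) := by
      intro hsuf
      have := hsuf.length_le
      omega
    simp [hnot, hmk]

-- ===== VERDICT (by name: the statement is the Claim_ definition above) =====
theorem window_has_complete_answer_py_spec : Claim_equal_window_has_complete_answer_py := by
  intro window delimiter_tokens _
  unfold Spec_window_has_complete_answer_py
  unfold window_has_complete_answer_py window_has_complete_answer_py_alt
  cases delimiter_tokens with
  | none => rfl
  | some d =>
      simp only []
      by_cases hz : (d.length : Int) == 0
      · rw [if_pos hz, if_pos hz]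
      · rw [if_neg hz, if_neg hz]
        have hd : d ≠ [] := by
          intro h; subst h; simp at hz
        rw [pvALoop_eq_count window d (d.length : Int) _ 0 le_rfl (by omega)]
        rw [pvBLoop_eq d hd window [] 0 0
              (by intro j; simp [pvGood, List.suffix_nil]
                  intro h; omega)
              le_rfl (by omega)]
        rw [pvAcount_eq_ends window d hd]
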